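-- pv_equiv track=rewrite | github.com/helington/cplib | code/solutions/MaratonaCIn-warm-up-2025/e.py | moves_increase_array
-- ===== SOURCE A (Python) =====
-- def moves_increase_array(array, n):
--     moves = 0
--     for i in range(1, n):
--         if array[i] < array[i - 1]:
--             difference = array[i - 1] - array[i]
--             moves += difference
--             array[i] += difference
--
--     return moves
-- ===== SOURCE B (Python) =====
-- def moves_increase_array(array, n):
--     # Two-pass decomposition: build the prefix-maxima table of the first
--     # max(n,0) elements, then the answer is the elementwise difference;
--     # writes the prefix maxima back in place (same mutation as the original).
--     k = max(n, 0)
--     head = array[:k]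
--     prefix = []
--     m = None
--     for a in head:
--         if m is None or a > m:
--             m = a
--         prefix.append(m)
--     moves = sum(p - a for p, a in zip(prefix, head))
--     array[:k] = prefix
--     return moves
-- ===== Notes on version B (the rewrite author's own statement) =====
-- stated objective: alternative
-- what changed: Replaces the single interleaved compare-and-patch loop over indices by a two-pass decomposition: first build the prefix-maxima table of the first n elements, then sum the elementwise differences and write the table back via one slice assignment.
import Mathlib
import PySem

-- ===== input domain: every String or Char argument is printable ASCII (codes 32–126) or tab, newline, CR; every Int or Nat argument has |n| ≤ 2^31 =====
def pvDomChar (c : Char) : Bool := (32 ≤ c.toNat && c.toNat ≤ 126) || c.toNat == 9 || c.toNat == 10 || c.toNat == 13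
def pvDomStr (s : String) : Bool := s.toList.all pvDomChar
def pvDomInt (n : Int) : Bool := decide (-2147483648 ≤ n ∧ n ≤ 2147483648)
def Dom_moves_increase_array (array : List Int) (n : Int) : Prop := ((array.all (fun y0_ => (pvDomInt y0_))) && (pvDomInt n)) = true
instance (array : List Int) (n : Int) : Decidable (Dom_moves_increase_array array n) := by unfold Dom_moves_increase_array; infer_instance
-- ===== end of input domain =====

-- B replaces A's interleaved compare-and-patch index loop by two passes: build the
-- prefix-maxima table of the first n elements, then sum elementwise differences
-- (objective: alternative decomposition). Both Pythons mutate the first n elements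
-- of `array` identically on Pre_; equivalence is proved about the RETURN value.

-- ===== PORT A =====
def mvStepA (st : List Int × Int) (i : Int) : List Int × Int :=
  let ai := PySem.List.pyGetD st.1 i 0
  let am := PySem.List.pyGetD st.1 (i - 1) 0
  if ai < am then
    let d := am - ai
    (PySem.List.pySetD st.1 i (ai + d), st.2 + d)
  else st

def moves_increase_array (array : List Int) (n : Int) : Int :=
  ((PySem.List.pyRange 1 n 1).foldl mvStepA (array, 0)).2

-- ===== PORT B =====
def moves_increase_array_alt (array : List Int) (n : Int) : Int :=
  let k := max n 0
  let head := PySem.List.slice array none (some k)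
  let pfx := (head.foldl (fun (acc : List Int × Option Int) a =>
      let m := match acc.2 with
        | none => a
        | some mm => if a > mm then a else mm
      (acc.1 ++ [m], some m)) ([], (none : Option Int))).1
  (pfx.zip head).foldl (fun s p => s + (p.1 - p.2)) 0

-- ===== PRECONDITION & SPEC =====
-- Pre_ excludes exactly the inputs on which A raises IndexError (n ≥ 2 and n > len(array)).
def Pre_moves_increase_array (array : List Int) (n : Int) : Prop :=
  n ≤ (array.length : Int) ∨ n ≤ 1
instance (array : List Int) (n : Int) : Decidable (Pre_moves_increase_array array n) := by
  unfold Pre_moves_increase_array; infer_instance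
def pvWitness_moves_increase_array : List Int × Int := ([3, 1, 2], 3)

def Spec_moves_increase_array (array : List Int) (n : Int) (out : Int) : Prop :=
  out = moves_increase_array_alt array n
instance (array : List Int) (n : Int) (out : Int) : Decidable (Spec_moves_increase_array array n out) := by
  unfold Spec_moves_increase_array; infer_instance

-- ===== CLAIM (what is proved, stated in full; the proofs are below) =====
def Claim_equal_moves_increase_array : Prop := ∀ (array : List Int) (n : Int), Dom_moves_increase_array array n → Pre_moves_increase_array array n → Spec_moves_increase_array array n (moves_increase_array array n)

-- ===== LEMMAS AND PROOFS =====

/-- Prefix maxima of a list, seeded with running maximum `m`. -/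
def pvPmax : Int → List Int → List Int
  | _, [] => []
  | m, a :: t => max m a :: pvPmax (max m a) t

/-- Reference count: total lift needed, running maximum `m`. -/
def pvRef : Int → List Int → Int
  | _, [] => 0
  | m, a :: t => (max m a - a) + pvRef (max m a) t

theorem pvIfMax (a m : Int) : (if a > m then a else m) = max m a := by
  rcases (by omega : a ≤ m ∨ m < a) with h | h
  · simp [not_lt.mpr h, max_eq_left h]
  · simp [h, max_eq_right h.le]

theorem pvB_fold (t : List Int) (acc : List Int) (m : Int) :
    (t.foldl (fun (acc : List Int × Option Int) a =>
      (acc.1 ++ [match acc.2 with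
        | none => a
        | some mm => if a > mm then a else mm],
       some (match acc.2 with
        | none => a
        | some mm => if a > mm then a else mm))) (acc, some m))
      = (acc ++ pvPmax m t, some (t.foldl max m)) := by
  induction t generalizing acc m with
  | nil => simp [pvPmax]
  | cons a t ih =>
      simp only [List.foldl_cons]
      rw [pvIfMax, ih]
      simp [pvPmax, List.append_assoc]

theorem pvB_sum (t : List Int) (m s : Int) :
    ((pvPmax m t).zip t).foldl (fun s p => s + (p.1 - p.2)) s = s + pvRef m t := by
  induction t generalizing m s with
  | nil => simp [pvPmax, pvRef]
  | cons a t ih => simp [pvPmax, pvRef, ih]; ring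

/-- B's value equals the reference count on `head`. -/
theorem pvB_eq_ref (array : List Int) (n : Int) :
    moves_increase_array_alt array n =
      match PySem.List.slice array none (some (max n 0)) with
      | [] => 0
      | a :: t => pvRef a t := by
  unfold moves_increase_array_alt
  cases h : PySem.List.slice array none (some (max n 0)) with
  | nil => simp only [h]; rfl
  | cons a t =>
      simp only [h, List.foldl_cons, List.nil_append]
      rw [pvB_fold t [a] a]
      simp only [List.singleton_append, List.zip_cons_cons, List.foldl_cons]
      simpa using pvB_sum t a (0 + (a - a))

theorem pvSet_middle (done rest : List Int) (a v : Int) :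
    (done ++ a :: rest).set done.length v = done ++ v :: rest := by
  induction done with
  | nil => simp
  | cons d done ih => simp [ih]

theorem pvGet_middle (done rest : List Int) (a : Int) :
    PySem.List.pyGetD (done ++ a :: rest) (done.length : Int) 0 = a := by
  rw [PySem.List.pyGetD_natCast, List.getD_append_right _ _ _ _ (Nat.le_refl _)]
  simp

theorem pvGet_last (done rest : List Int) (m : Int) (hne : done ≠ [])
    (hlast : done.getLast? = some m) :
    PySem.List.pyGetD (done ++ rest) ((done.length : Int) - 1) 0 = m := by
  have hlen : 0 < done.length := List.length_pos_iff.mpr hne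
  rw [show ((done.length : Int) - 1) = ((done.length - 1 : Nat) : Int) by omega,
     PySem.List.pyGetD_natCast, List.getD_append _ _ _ _ (by omega), List.getD_eq_getElem?_getD,
     ← List.getLast?_eq_getElem?, hlast]
  rfl

/-- Main invariant for A's loop: indices `done.length …` turn `t` into its prefix
maxima (seeded with `m`, the last processed value) and add `pvRef m t` to the count. -/
theorem pvA_loop (t : List Int) (done rest : List Int) (m s : Int)
    (hne : done ≠ []) (hlast : done.getLast? = some m) :
    (PySem.List.pyRange (done.length : Int) ((done.length + t.length : Nat) : Int) 1).foldl
        mvStepA (done ++ t ++ rest, s)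
      = (done ++ pvPmax m t ++ rest, s + pvRef m t) := by
  induction t generalizing done rest m s with
  | nil => simp [PySem.List.pyRange_one_eq_nil, pvPmax, pvRef]
  | cons a t ih =>
      have hlt : ((done.length : Int)) < ((done.length + (a :: t).length : Nat) : Int) := by
        push_cast; simp
      rw [PySem.List.pyRange_one_cons hlt]
      simp only [List.foldl_cons]
      have hstep : mvStepA (done ++ (a :: t) ++ rest, s) (done.length : Int)
          = ((done ++ [max m a]) ++ t ++ rest, s + (max m a - a)) := by
        unfold mvStepA
        have h1 : PySem.List.pyGetD (done ++ (a :: t) ++ rest) (done.length : Int) 0 = a := by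
          rw [List.append_assoc, List.cons_append]; exact pvGet_middle done (t ++ rest) a
        have h2 : PySem.List.pyGetD (done ++ (a :: t) ++ rest) ((done.length : Int) - 1) 0 = m := by
          rw [List.append_assoc]; exact pvGet_last done ((a :: t) ++ rest) m hne hlast
        simp only [h1, h2]
        rcases (by omega : a < m ∨ m ≤ a) with h | h
        · simp only [if_pos h]
          rw [PySem.List.pySetD_natCast,
            show done ++ (a :: t) ++ rest = done ++ a :: (t ++ rest) by simp,
            pvSet_middle done (t ++ rest) a (a + (m - a)),
            show a + (m - a) = max m a by omega]
          simp only [Prod.mk.injEq]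
          constructor
          · simp
          · omega
        · simp only [if_neg (not_lt.mpr h), max_eq_right h]
          simp only [Prod.mk.injEq]
          constructor
          · simp
          · omega
      rw [hstep]
      have hcast : ((done.length : Int) + 1) = (((done ++ [max m a]).length : Nat) : Int) := by
        simp
      have hcast2 : ((done.length + (a :: t).length : Nat) : Int)
          = (((done ++ [max m a]).length + t.length : Nat) : Int) := by
        simp; omega
      rw [hcast, hcast2,
        ih (done ++ [max m a]) rest (max m a) (s + (max m a - a)) (by simp)
          (by simp [List.getLast?_append])]
      simp only [pvPmax, pvRef, Prod.mk.injEq]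
      constructor
      · simp [List.append_assoc]
      · ring

-- ===== VERDICT (by name: the statement is the Claim_ definition above) =====
theorem moves_increase_array_spec : Claim_equal_moves_increase_array := by
  intro array n _ hpre
  unfold Spec_moves_increase_array
  rw [pvB_eq_ref]
  by_cases hn : n ≤ 1
  · -- A's range is empty
    unfold moves_increase_array
    rw [PySem.List.pyRange_one_eq_nil hn]
    by_cases h0 : n ≤ 0
    · rw [show max n 0 = 0 by omega]
      simp [PySem.List.slice_to]
    · have hn1 : n = 1 := by omega
      subst hn1
      rw [show max (1 : Int) 0 = 1 by decide,
        show PySem.List.slice array none (some (1 : Int)) = array.take (1 : Int).toNat from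
          PySem.List.slice_to array (by norm_num)]
      cases array with
      | nil => simp
      | cons a t => simp [pvRef]
  · -- 2 ≤ n ≤ length
    push_neg at hn
    have hlen : n ≤ (array.length : Int) := by
      rcases hpre with h | h
      · exact h
      · omega
    rw [show max n 0 = n by omega]
    cases array with
    | nil => simp at hlen; omega
    | cons a t =>
        have hj : (n - 1).toNat ≤ t.length := by
          simp at hlen; omega
        set j := (n - 1).toNat with hjdef
        have H := pvA_loop (t.take j) [a] (t.drop j) a 0 (by simp) (by simp)
        simp only [List.length_singleton, List.length_take, min_eq_left hj, Nat.cast_one,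
          Nat.cast_add] at H
        rw [show (1 : Int) + (j : Int) = n by omega] at H
        rw [List.append_assoc, List.singleton_append, List.take_append_drop] at H
        unfold moves_increase_array
        rw [H,
          show PySem.List.slice (a :: t) none (some n) = (a :: t).take n.toNat from
            PySem.List.slice_to (a :: t) (by omega),
          show (a :: t).take n.toNat = a :: t.take j by
            rw [show n.toNat = j + 1 by omega]; simp]
        simp
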